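-- pv_equiv track=rewrite | github.com/bsullgrim/Req-Act-NLP | src/deprecated/demos/html_visualizer.py | _render_missing_components
-- ===== SOURCE A (Python) =====
-- from typing import Dict, List, Any, Optional
--
-- def _render_missing_components(layer5: Dict) -> str:
--     """Render missing components section."""
--     missing_req = layer5.get('missing_required', [])
--     missing_opt = layer5.get('missing_optional', [])
--
--     if not missing_req and not missing_opt:
--         return ''
--
--     html = '<div class="subsection">'
--     html += '<div class="subsection-title">Missing Components</div>'
--
--     if missing_req:
--         html += '<div style="color: #dc3545; margin: 10px 0;">'
--         html += '<strong>Required:</strong> '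
--         html += ', '.join([f'<span class="badge badge-danger">{c}</span>' for c in missing_req])
--         html += '</div>'
--
--     if missing_opt:
--         html += '<div style="color: #ffc107; margin: 10px 0;">'
--         html += '<strong>Optional:</strong> '
--         html += ', '.join([f'<span class="badge badge-warning">{c}</span>' for c in missing_opt])
--         html += '</div>'
--
--     html += '</div>'
--     return html
-- ===== SOURCE B (Python) =====
-- def _render_missing_components(layer5):
--     """Render missing components section (table-driven)."""
--     missing_req = layer5.get('missing_required', [])
--     missing_opt = layer5.get('missing_optional', [])
--
--     if not missing_req and not missing_opt:
--         return ''
--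
--     sections = [
--         (missing_req, 'Required', '#dc3545', 'badge-danger'),
--         (missing_opt, 'Optional', '#ffc107', 'badge-warning'),
--     ]
--     parts = ['<div class="subsection">',
--              '<div class="subsection-title">Missing Components</div>']
--     for items, label, color, cls in sections:
--         if items:
--             badges = ', '.join(f'<span class="badge {cls}">{c}</span>' for c in items)
--             parts.append(f'<div style="color: {color}; margin: 10px 0;">'
--                          f'<strong>{label}:</strong> {badges}</div>')
--     parts.append('</div>')
--     return ''.join(parts)
-- ===== Notes on version B (the rewrite author's own statement) =====
-- stated objective: simpler
-- what changed: Replaces A's two hardcoded, duplicated section blocks with one table-driven loop over (items, label, color, class) descriptors that appends each rendered section to a parts list joined at the end.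
import Mathlib
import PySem

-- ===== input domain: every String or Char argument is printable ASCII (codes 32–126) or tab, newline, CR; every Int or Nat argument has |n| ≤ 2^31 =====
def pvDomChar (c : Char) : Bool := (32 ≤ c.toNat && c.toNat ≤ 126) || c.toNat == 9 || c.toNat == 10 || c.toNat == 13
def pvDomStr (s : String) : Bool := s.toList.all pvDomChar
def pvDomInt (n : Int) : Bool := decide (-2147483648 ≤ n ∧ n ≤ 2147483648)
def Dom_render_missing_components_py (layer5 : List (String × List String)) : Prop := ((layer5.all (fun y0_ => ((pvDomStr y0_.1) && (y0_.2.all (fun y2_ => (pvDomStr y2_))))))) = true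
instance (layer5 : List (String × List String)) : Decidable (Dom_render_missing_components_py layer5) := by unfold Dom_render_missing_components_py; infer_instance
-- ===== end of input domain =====

-- B is a table-driven rewrite of A's two hardcoded section blocks (one loop over section descriptors); return value only, no speed claim.

-- ===== PORT A =====
def render_missing_components_py (layer5 : List (String × List String)) : String :=
  let missing_req := (PySem.Dict.mk layer5).getD "missing_required" []
  let missing_opt := (PySem.Dict.mk layer5).getD "missing_optional" []
  if missing_req.isEmpty && missing_opt.isEmpty then "" else
    let html := "<div class=\"subsection\">"
    let html := html ++ "<div class=\"subsection-title\">Missing Components</div>"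
    let html :=
      if missing_req.isEmpty then html else
        let html := html ++ "<div style=\"color: #dc3545; margin: 10px 0;\">"
        let html := html ++ "<strong>Required:</strong> "
        let html := html ++ PySem.Str.join ", "
          (missing_req.map (fun c => "<span class=\"badge badge-danger\">" ++ c ++ "</span>"))
        html ++ "</div>"
    let html :=
      if missing_opt.isEmpty then html else
        let html := html ++ "<div style=\"color: #ffc107; margin: 10px 0;\">"
        let html := html ++ "<strong>Optional:</strong> "
        let html := html ++ PySem.Str.join ", "
          (missing_opt.map (fun c => "<span class=\"badge badge-warning\">" ++ c ++ "</span>"))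
        html ++ "</div>"
    html ++ "</div>"

-- ===== PORT B =====
def render_missing_components_py_alt (layer5 : List (String × List String)) : String :=
  let missing_req := (PySem.Dict.mk layer5).getD "missing_required" []
  let missing_opt := (PySem.Dict.mk layer5).getD "missing_optional" []
  if missing_req.isEmpty && missing_opt.isEmpty then "" else
    let sections : List (List String × String × String × String) :=
      [(missing_req, "Required", "#dc3545", "badge-danger"),
       (missing_opt, "Optional", "#ffc107", "badge-warning")]
    let parts := ["<div class=\"subsection\">",
                  "<div class=\"subsection-title\">Missing Components</div>"]
    let parts := sections.foldl (fun parts sec =>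
      match sec with
      | (items, label, color, cls) =>
        if items.isEmpty then parts else
          let badges := PySem.Str.join ", "
            (items.map (fun c => "<span class=\"badge " ++ cls ++ "\">" ++ c ++ "</span>"))
          parts ++ ["<div style=\"color: " ++ color ++ "; margin: 10px 0;\"><strong>"
                    ++ label ++ ":</strong> " ++ badges ++ "</div>"]) parts
    let parts := parts ++ ["</div>"]
    PySem.Str.join "" parts

-- ===== PRECONDITION & SPEC =====
def Spec_render_missing_components_py (layer5 : List (String × List String)) (out : String) : Prop := out = render_missing_components_py_alt layer5
instance (layer5 : List (String × List String)) (out : String) : Decidable (Spec_render_missing_components_py layer5 out) := by unfold Spec_render_missing_components_py; infer_instance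

-- ===== CLAIM (what is proved, stated in full; the proofs are below) =====
def Claim_equal_render_missing_components_py : Prop := ∀ (layer5 : List (String × List String)), Dom_render_missing_components_py layer5 → Spec_render_missing_components_py layer5 (render_missing_components_py layer5)

-- ===== LEMMAS AND PROOFS =====

-- ===== VERDICT (by name: the statement is the Claim_ definition above) =====
set_option maxRecDepth 4096 in
theorem render_missing_components_py_spec : Claim_equal_render_missing_components_py := by
  intro layer5 _
  unfold Spec_render_missing_components_py render_missing_components_py render_missing_components_py_alt
  set req := (PySem.Dict.mk layer5).getD "missing_required" [] with hreq
  set opt := (PySem.Dict.mk layer5).getD "missing_optional" [] with hopt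
  by_cases h1 : req = [] <;> by_cases h2 : opt = [] <;>
    rw [← String.toList_inj] <;>
    simp [h1, h2, PySem.Str.toList_join, PySem.Chars.join, String.toList_append,
      List.intercalate, List.append_assoc]
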